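-- pv_equiv track=rewrite | github.com/jim-min/CN-TCP-GUI-based | server.py | check_titles_validity
-- ===== SOURCE A (Python) =====
-- def check_titles_validity(d_title, sec_titles):
--     # 섹션 제목이 중복되거나 섹션, 문서 제목 64바이트 넘어가면 False
--     if len(d_title.encode('utf-8')) > 64:
--         return False
--
--     if len(set(sec_titles)) != len(sec_titles):
--         return False
--
--     for title in sec_titles:
--         if len(title.encode('utf-8')) > 64:
--             return False
--
--     return True
-- ===== SOURCE B (Python) =====
-- def check_titles_validity(d_title, sec_titles):
--     if len(d_title.encode('utf-8')) > 64:
--         return False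
--     srt = sorted(sec_titles)
--     if any(a == b for a, b in zip(srt, srt[1:])):
--         return False
--     return all(len(t.encode('utf-8')) <= 64 for t in srt)
-- ===== Notes on version B (the rewrite author's own statement) =====
-- stated objective: alternative
-- what changed: Duplicate detection is done by sorting the titles and scanning adjacent pairs for equality (no set at all), and the byte-length check runs over the sorted list with all(); A builds a set and compares cardinalities, then scans lengths.
import Mathlib
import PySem

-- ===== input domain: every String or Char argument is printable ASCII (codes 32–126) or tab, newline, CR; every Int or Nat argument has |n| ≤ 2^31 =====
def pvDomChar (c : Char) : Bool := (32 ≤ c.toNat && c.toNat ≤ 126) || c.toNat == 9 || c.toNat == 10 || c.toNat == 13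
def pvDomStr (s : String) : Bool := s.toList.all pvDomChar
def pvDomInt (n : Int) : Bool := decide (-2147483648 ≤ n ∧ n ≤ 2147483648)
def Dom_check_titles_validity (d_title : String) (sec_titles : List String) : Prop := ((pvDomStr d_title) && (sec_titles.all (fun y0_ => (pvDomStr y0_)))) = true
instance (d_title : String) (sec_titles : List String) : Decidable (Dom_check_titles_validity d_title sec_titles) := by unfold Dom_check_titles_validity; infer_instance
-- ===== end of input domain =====

-- B detects duplicate titles by sorting and scanning adjacent pairs instead of A's set-cardinality
-- comparison, and checks byte lengths over the sorted list (objective: alternative, same result).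
-- len(s.encode('utf-8')) is ported as PySem.Str.len: exact on Dom (ASCII/tab/newline/CR are 1 byte each in UTF-8).

-- ===== PORT A =====
-- A's final 'for title in sec_titles' length scan
def pvLoopA : List String → Bool
  | [] => true
  | t :: rest => if PySem.Str.len t > 64 then false else pvLoopA rest

def check_titles_validity (d_title : String) (sec_titles : List String) : Bool :=
  if PySem.Str.len d_title > 64 then false
  else if PySem.Set.len (PySem.Set.ofList sec_titles) ≠ PySem.List.len sec_titles then false
  else pvLoopA sec_titles

-- ===== PORT B =====
def check_titles_validity_alt (d_title : String) (sec_titles : List String) : Bool :=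
  if PySem.Str.len d_title > 64 then false
  else
    let srt := PySem.List.sorted sec_titles (fun x => x) false
    -- any(a == b for a, b in zip(srt, srt[1:]))
    if (srt.zip (PySem.List.slice srt (some (1 : Int)) none)).any (fun p => p.1 == p.2) then false
    -- all(len(t.encode('utf-8')) <= 64 for t in srt)
    else srt.all (fun t => PySem.Str.len t ≤ 64)

-- ===== PRECONDITION & SPEC =====
def Spec_check_titles_validity (d_title : String) (sec_titles : List String) (out : Bool) : Prop := out = check_titles_validity_alt d_title sec_titles
instance (d_title : String) (sec_titles : List String) (out : Bool) : Decidable (Spec_check_titles_validity d_title sec_titles out) := by unfold Spec_check_titles_validity; infer_instance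

-- ===== CLAIM (what is proved, stated in full; the proofs are below) =====
def Claim_equal_check_titles_validity : Prop := ∀ (d_title : String) (sec_titles : List String), Dom_check_titles_validity d_title sec_titles → Spec_check_titles_validity d_title sec_titles (check_titles_validity d_title sec_titles)

-- ===== LEMMAS AND PROOFS =====

theorem pvOfList_sublist (xs : List String) : (PySem.Set.ofList xs).Sublist xs := by
  induction xs with
  | nil => simp [PySem.Set.ofList_nil]
  | cons x xs ih =>
    rw [PySem.Set.ofList_cons]
    exact List.cons_sublist_cons.mpr ((List.filter_sublist).trans ih)

theorem pvLenOfList_iff (xs : List String) :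
    (PySem.Set.ofList xs).length = xs.length ↔ xs.Nodup := by
  constructor
  · intro h
    have he := (pvOfList_sublist xs).eq_of_length h
    rw [← he]
    exact PySem.Set.nodup_ofList xs
  · intro h
    rw [PySem.Set.ofList_eq_self_of_nodup xs h]

theorem pvSetLen_ne_iff (xs : List String) :
    (PySem.Set.len (PySem.Set.ofList xs) ≠ PySem.List.len xs) ↔ ¬ xs.Nodup := by
  rw [not_congr (pvLenOfList_iff xs).symm]
  simp only [PySem.Set.len, PySem.List.len, ne_eq, Nat.cast_inj]

theorem pvLoopA_iff (xs : List String) :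
    pvLoopA xs = true ↔ ∀ t ∈ xs, PySem.Str.len t ≤ 64 := by
  induction xs with
  | nil => simp [pvLoopA]
  | cons t r ih =>
    simp only [pvLoopA, List.forall_mem_cons]
    split_ifs with h
    · have h64 : ¬ (PySem.Str.len t ≤ 64) := by omega
      constructor
      · intro hf; exact absurd hf (by simp)
      · intro hall; exact absurd hall.1 h64
    · rw [ih]
      exact ⟨fun h1 => ⟨by omega, h1⟩, fun h1 => h1.2⟩

-- on an ≤-sorted list, "no two adjacent elements equal" is exactly Nodup
theorem pvAdjZip_iff (xs : List String) (hs : xs.Pairwise (· ≤ ·)) :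
    ((xs.zip (xs.drop 1)).any (fun p => p.1 == p.2) = false) ↔ xs.Nodup := by
  induction xs with
  | nil => simp
  | cons a t ih =>
    cases t with
    | nil => simp
    | cons b r =>
      have hpw : (b :: r).Pairwise (· ≤ ·) := hs.tail
      have hab : a ≤ b := (List.pairwise_cons.mp hs).1 b (by simp)
      simp only [List.drop_succ_cons, List.drop_zero, List.zip_cons_cons, List.any_cons,
        Bool.or_eq_false_iff, beq_eq_false_iff_ne, ne_eq, List.nodup_cons]
      simp only [List.drop_one, List.tail_cons] at ih
      rw [ih hpw]
      constructor
      · rintro ⟨hne, hnd⟩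
        refine ⟨?_, List.nodup_cons.mp hnd⟩
        intro hmem
        rcases List.mem_cons.mp hmem with h | h
        · exact hne h
        · have hba : b ≤ a := (List.pairwise_cons.mp hpw).1 a h
          exact hne (le_antisymm hab hba)
      · rintro ⟨hnm, hnd2⟩
        exact ⟨fun he => hnm (he ▸ List.mem_cons_self), List.nodup_cons.mpr hnd2⟩

-- ===== VERDICT (by name: the statement is the Claim_ definition above) =====
theorem check_titles_validity_spec : Claim_equal_check_titles_validity := by
  intro d sec _
  unfold Spec_check_titles_validity check_titles_validity check_titles_validity_alt
  by_cases hd : PySem.Str.len d > 64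
  · rw [if_pos hd, if_pos hd]
  · rw [if_neg hd, if_neg hd]
    set srt := PySem.List.sorted sec (fun x => x) false with hsrt
    have hperm : srt.Perm sec := PySem.List.sorted_perm sec (fun x => x) false
    have hpw : srt.Pairwise (· ≤ ·) := PySem.List.sorted_pairwise sec (fun x => x)
    have hslice : PySem.List.slice srt (some (1 : Int)) none = srt.drop 1 := by
      have := PySem.List.slice_from_natCast srt 1
      simpa using this
    simp only [hslice]
    by_cases hnd : sec.Nodup
    · have hnds : srt.Nodup := hperm.nodup_iff.mpr hnd
      have hadj : ((srt.zip (srt.drop 1)).any (fun p => p.1 == p.2)) = false :=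
        (pvAdjZip_iff srt hpw).mpr hnds
      rw [if_neg (fun hc => ((pvSetLen_ne_iff sec).mp hc) hnd),
        if_neg (ne_true_of_eq_false hadj),
        Bool.eq_iff_iff, pvLoopA_iff, List.all_eq_true]
      simp only [decide_eq_true_eq]
      exact ⟨fun h1 t ht => h1 t (hperm.mem_iff.mp ht), fun h1 t ht => h1 t (hperm.mem_iff.mpr ht)⟩
    · have hnds : ¬ srt.Nodup := fun h => hnd (hperm.nodup_iff.mp h)
      have hany : ((srt.zip (srt.drop 1)).any (fun p => p.1 == p.2)) = true := by
        rcases Bool.eq_false_or_eq_true ((srt.zip (srt.drop 1)).any (fun p => p.1 == p.2)) with h | h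
        · exact h
        · exact absurd ((pvAdjZip_iff srt hpw).mp h) hnds
      rw [if_pos ((pvSetLen_ne_iff sec).mpr hnd), if_pos hany]
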